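-- pv_equiv track=rewrite | github.com/raphischer/xpcr | mlprops/labels/label_generation.py | find_icon
-- ===== SOURCE A (Python) =====
-- def find_icon(metric_key, metric_group, icons):
--     # check for exact name match
--     for key, path in icons.items():
--         if key == metric_key:
--             return path
--     # check for exact group match
--     for key, path in icons.items():
--         if key == metric_group:
--             return path
--     # check for similar name match
--     for key, path in icons.items():
--         if key in metric_key:
--             return path
--     # check for similar group match
--     for key, path in icons.items():
--         if key in metric_group:
--             return path
--     # TODO implement option to pass a mapping dictionary?
--     return next(iter(icons.values()))
-- ===== SOURCE B (Python) =====
-- def find_icon(metric_key, metric_group, icons):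
--     # single pass: rank each key, keep the path with the strictly lowest rank
--     best_path = None
--     best_prio = 4
--     for key, path in icons.items():
--         if key == metric_key:
--             prio = 0
--         elif key == metric_group:
--             prio = 1
--         elif key in metric_key:
--             prio = 2
--         elif key in metric_group:
--             prio = 3
--         else:
--             continue
--         if prio < best_prio:
--             best_prio = prio
--             best_path = path
--     if best_path is not None:
--         return best_path
--     return next(iter(icons.values()))
-- ===== Notes on version B (the rewrite author's own statement) =====
-- stated objective: alternative
-- what changed: Replaces A's four sequential scans over icons by one pass that ranks every key (exact-name, exact-group, substring-of-name, substring-of-group) and keeps the path with the strictly lowest rank seen, preserving first-match-wins per rank.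
import Mathlib
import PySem

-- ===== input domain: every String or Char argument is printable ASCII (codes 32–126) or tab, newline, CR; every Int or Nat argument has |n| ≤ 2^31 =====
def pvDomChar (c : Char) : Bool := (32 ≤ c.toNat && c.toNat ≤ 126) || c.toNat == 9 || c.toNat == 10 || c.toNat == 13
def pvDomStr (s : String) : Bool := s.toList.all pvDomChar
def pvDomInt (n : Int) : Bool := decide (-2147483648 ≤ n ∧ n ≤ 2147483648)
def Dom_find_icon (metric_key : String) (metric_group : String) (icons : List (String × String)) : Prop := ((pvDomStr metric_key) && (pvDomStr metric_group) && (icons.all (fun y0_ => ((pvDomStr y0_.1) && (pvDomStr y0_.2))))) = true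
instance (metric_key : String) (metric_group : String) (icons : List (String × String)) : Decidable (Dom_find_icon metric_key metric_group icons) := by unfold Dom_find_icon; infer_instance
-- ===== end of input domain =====

-- B replaces A's four sequential scans by one pass that ranks each key and keeps the
-- strictly-lowest rank (objective: alternative single-pass decomposition, same results).

-- ===== PORT A =====
-- shared by both ports: the items of the Python dict argument (insertion order, overwrite)
def pvItems (icons : List (String × String)) : List (String × String) :=
  (PySem.Dict.ofList icons).items

-- 'return next(iter(icons.values()))'; "" is never reached under Pre_ (icons ≠ [])
def pvFallback : List (String × String) → String
  | [] => ""
  | (_, path) :: _ => path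

-- one 'for key, path in …: if key == t: return path' loop
def scanEq (t : String) : List (String × String) → Option String
  | [] => none
  | (k, path) :: rest => if k == t then some path else scanEq t rest

-- one 'for key, path in …: if key in t: return path' loop
def scanIn (t : String) : List (String × String) → Option String
  | [] => none
  | (k, path) :: rest => if PySem.Str.isIn k t then some path else scanIn t rest

def find_icon (metric_key : String) (metric_group : String) (icons : List (String × String)) : String :=
  match scanEq metric_key (pvItems icons) with
  | some p => p
  | none =>
    match scanEq metric_group (pvItems icons) with
    | some p => p
    | none =>
      match scanIn metric_key (pvItems icons) with
      | some p => p
      | none =>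
        match scanIn metric_group (pvItems icons) with
        | some p => p
        | none => pvFallback (pvItems icons)

-- ===== PORT B =====
-- the elif chain of Source B: rank of a key (4 = 'continue')
def pvPrio (metric_key metric_group k : String) : Nat :=
  if k == metric_key then 0
  else if k == metric_group then 1
  else if PySem.Str.isIn k metric_key then 2
  else if PySem.Str.isIn k metric_group then 3
  else 4

-- Source B's single loop: state = (best_prio, best_path)
def loopB (metric_key metric_group : String) : List (String × String) → Nat → Option String → Nat × Option String
  | [], p, b => (p, b)
  | (k, path) :: rest, p, b =>
    let q := pvPrio metric_key metric_group k
    if q < p then loopB metric_key metric_group rest q (some path)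
    else loopB metric_key metric_group rest p b

def find_icon_alt (metric_key : String) (metric_group : String) (icons : List (String × String)) : String :=
  match (loopB metric_key metric_group (pvItems icons) 4 none).2 with
  | some path => path
  | none => pvFallback (pvItems icons)

-- ===== PRECONDITION & SPEC =====
-- Pre_ excludes only empty icons, on which A raises StopIteration (and B raises it too).
def Pre_find_icon (metric_key : String) (metric_group : String) (icons : List (String × String)) : Prop :=
  icons ≠ []
instance (metric_key : String) (metric_group : String) (icons : List (String × String)) : Decidable (Pre_find_icon metric_key metric_group icons) := by unfold Pre_find_icon; infer_instance

def pvWitness_find_icon : String × String × (List (String × String)) :=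
  ("accuracy", "Quality", [("acc", "icons/acc.svg"), ("time", "icons/time.svg")])

def Spec_find_icon (metric_key : String) (metric_group : String) (icons : List (String × String)) (out : String) : Prop := out = find_icon_alt metric_key metric_group icons
instance (metric_key : String) (metric_group : String) (icons : List (String × String)) (out : String) : Decidable (Spec_find_icon metric_key metric_group icons out) := by unfold Spec_find_icon; infer_instance

-- ===== CLAIM (what is proved, stated in full; the proofs are below) =====
def Claim_equal_find_icon : Prop := ∀ (metric_key : String) (metric_group : String) (icons : List (String × String)), Dom_find_icon metric_key metric_group icons → Pre_find_icon metric_key metric_group icons → Spec_find_icon metric_key metric_group icons (find_icon metric_key metric_group icons)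

-- ===== LEMMAS AND PROOFS =====

theorem loopB_stay0 (mk mg : String) (l : List (String × String)) :
    ∀ (b : Option String), loopB mk mg l 0 b = (0, b) := by
  induction l with
  | nil => intro b; rfl
  | cons hd tl ih =>
    intro b
    obtain ⟨k, path⟩ := hd
    simp only [loopB, if_neg (by omega : ¬ pvPrio mk mg k < 0)]
    exact ih b

theorem loopB_find0 (mk mg : String) (l : List (String × String)) (x : String) :
    ∀ (p : Nat) (b : Option String), 1 ≤ p → scanEq mk l = some x →
      loopB mk mg l p b = (0, some x) := by
  induction l with
  | nil => intro p b _ h; simp [scanEq] at h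
  | cons hd tl ih =>
    intro p b hp h
    obtain ⟨k, path⟩ := hd
    by_cases hk : k == mk
    · simp only [scanEq, if_pos hk] at h
      have h0 : pvPrio mk mg k = 0 := by simp only [pvPrio, if_pos hk]
      simp only [loopB, h0, if_pos (by omega : 0 < p)]
      rw [show some path = some x from h] at *
      exact loopB_stay0 mk mg tl (some x)
    · simp only [scanEq, if_neg hk] at h
      have hq : 1 ≤ pvPrio mk mg k := by
        simp only [pvPrio, if_neg hk]; split_ifs <;> omega
      simp only [loopB]
      split_ifs with hlt
      · exact ih _ _ hq h
      · exact ih _ _ hp h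

theorem loopB_stay1 (mk mg : String) (l : List (String × String)) :
    ∀ (b : Option String), scanEq mk l = none → loopB mk mg l 1 b = (1, b) := by
  induction l with
  | nil => intro b _; rfl
  | cons hd tl ih =>
    intro b h0
    obtain ⟨k, path⟩ := hd
    by_cases hk : k == mk
    · simp only [scanEq, if_pos hk] at h0; cases h0
    · simp only [scanEq, if_neg hk] at h0
      have hq : 1 ≤ pvPrio mk mg k := by
        simp only [pvPrio, if_neg hk]; split_ifs <;> omega
      simp only [loopB, if_neg (by omega : ¬ pvPrio mk mg k < 1)]
      exact ih b h0

theorem loopB_find1 (mk mg : String) (l : List (String × String)) (x : String) :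
    ∀ (p : Nat) (b : Option String), 2 ≤ p → scanEq mk l = none → scanEq mg l = some x →
      loopB mk mg l p b = (1, some x) := by
  induction l with
  | nil => intro p b _ _ h; simp [scanEq] at h
  | cons hd tl ih =>
    intro p b hp h0 h1
    obtain ⟨k, path⟩ := hd
    by_cases hk : k == mk
    · simp only [scanEq, if_pos hk] at h0; cases h0
    · simp only [scanEq, if_neg hk] at h0
      by_cases hg : k == mg
      · simp only [scanEq, if_pos hg] at h1
        have hq : pvPrio mk mg k = 1 := by simp only [pvPrio, if_neg hk, if_pos hg]
        simp only [loopB, hq, if_pos (by omega : 1 < p)]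
        rw [show some path = some x from h1] at *
        exact loopB_stay1 mk mg tl (some x) h0
      · simp only [scanEq, if_neg hg] at h1
        have hq : 2 ≤ pvPrio mk mg k := by
          simp only [pvPrio, if_neg hk, if_neg hg]; split_ifs <;> omega
        simp only [loopB]
        split_ifs with hlt
        · exact ih _ _ hq h0 h1
        · exact ih _ _ hp h0 h1

theorem loopB_stay2 (mk mg : String) (l : List (String × String)) :
    ∀ (b : Option String), scanEq mk l = none → scanEq mg l = none →
      loopB mk mg l 2 b = (2, b) := by
  induction l with
  | nil => intro b _ _; rfl
  | cons hd tl ih =>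
    intro b h0 h1
    obtain ⟨k, path⟩ := hd
    by_cases hk : k == mk
    · simp only [scanEq, if_pos hk] at h0; cases h0
    by_cases hg : k == mg
    · simp only [scanEq, if_pos hg] at h1; cases h1
    simp only [scanEq, if_neg hk] at h0
    simp only [scanEq, if_neg hg] at h1
    have hq : 2 ≤ pvPrio mk mg k := by
      simp only [pvPrio, if_neg hk, if_neg hg]; split_ifs <;> omega
    simp only [loopB, if_neg (by omega : ¬ pvPrio mk mg k < 2)]
    exact ih b h0 h1

theorem loopB_find2 (mk mg : String) (l : List (String × String)) (x : String) :
    ∀ (p : Nat) (b : Option String), 3 ≤ p → scanEq mk l = none → scanEq mg l = none →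
      scanIn mk l = some x → loopB mk mg l p b = (2, some x) := by
  induction l with
  | nil => intro p b _ _ _ h; simp [scanIn] at h
  | cons hd tl ih =>
    intro p b hp h0 h1 h2
    obtain ⟨k, path⟩ := hd
    by_cases hk : k == mk
    · simp only [scanEq, if_pos hk] at h0; cases h0
    by_cases hg : k == mg
    · simp only [scanEq, if_pos hg] at h1; cases h1
    simp only [scanEq, if_neg hk] at h0
    simp only [scanEq, if_neg hg] at h1
    by_cases hin : PySem.Str.isIn k mk
    · simp only [scanIn, if_pos hin] at h2
      have hq : pvPrio mk mg k = 2 := by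
        simp only [pvPrio, if_neg hk, if_neg hg, if_pos hin]
      simp only [loopB, hq, if_pos (by omega : 2 < p)]
      rw [show some path = some x from h2] at *
      exact loopB_stay2 mk mg tl (some x) h0 h1
    · simp only [scanIn, if_neg hin] at h2
      have hq : 3 ≤ pvPrio mk mg k := by
        simp only [pvPrio, if_neg hk, if_neg hg, if_neg hin]; split_ifs <;> omega
      simp only [loopB]
      split_ifs with hlt
      · exact ih _ _ hq h0 h1 h2
      · exact ih _ _ hp h0 h1 h2

theorem loopB_stay3 (mk mg : String) (l : List (String × String)) :
    ∀ (b : Option String), scanEq mk l = none → scanEq mg l = none → scanIn mk l = none →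
      loopB mk mg l 3 b = (3, b) := by
  induction l with
  | nil => intro b _ _ _; rfl
  | cons hd tl ih =>
    intro b h0 h1 h2
    obtain ⟨k, path⟩ := hd
    by_cases hk : k == mk
    · simp only [scanEq, if_pos hk] at h0; cases h0
    by_cases hg : k == mg
    · simp only [scanEq, if_pos hg] at h1; cases h1
    by_cases hin : PySem.Str.isIn k mk
    · simp only [scanIn, if_pos hin] at h2; cases h2
    simp only [scanEq, if_neg hk] at h0
    simp only [scanEq, if_neg hg] at h1
    simp only [scanIn, if_neg hin] at h2
    have hq : 3 ≤ pvPrio mk mg k := by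
      simp only [pvPrio, if_neg hk, if_neg hg, if_neg hin]; split_ifs <;> omega
    simp only [loopB, if_neg (by omega : ¬ pvPrio mk mg k < 3)]
    exact ih b h0 h1 h2

theorem loopB_find3 (mk mg : String) (l : List (String × String)) (x : String) :
    ∀ (b : Option String), scanEq mk l = none → scanEq mg l = none →
      scanIn mk l = none → scanIn mg l = some x → loopB mk mg l 4 b = (3, some x) := by
  induction l with
  | nil => intro b _ _ _ h; simp [scanIn] at h
  | cons hd tl ih =>
    intro b h0 h1 h2 h3
    obtain ⟨k, path⟩ := hd
    by_cases hk : k == mk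
    · simp only [scanEq, if_pos hk] at h0; cases h0
    by_cases hg : k == mg
    · simp only [scanEq, if_pos hg] at h1; cases h1
    by_cases hin : PySem.Str.isIn k mk
    · simp only [scanIn, if_pos hin] at h2; cases h2
    simp only [scanEq, if_neg hk] at h0
    simp only [scanEq, if_neg hg] at h1
    simp only [scanIn, if_neg hin] at h2
    by_cases hig : PySem.Str.isIn k mg
    · simp only [scanIn, if_pos hig] at h3
      have hq : pvPrio mk mg k = 3 := by
        simp only [pvPrio, if_neg hk, if_neg hg, if_neg hin, if_pos hig]
      simp only [loopB, hq, if_pos (by omega : 3 < 4)]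
      rw [show some path = some x from h3] at *
      exact loopB_stay3 mk mg tl (some x) h0 h1 h2
    · simp only [scanIn, if_neg hig] at h3
      have hq : pvPrio mk mg k = 4 := by
        simp only [pvPrio, if_neg hk, if_neg hg, if_neg hin, if_neg hig]
      simp only [loopB, hq, if_neg (by omega : ¬ (4:Nat) < 4)]
      exact ih b h0 h1 h2 h3

theorem loopB_none (mk mg : String) (l : List (String × String)) :
    ∀ (b : Option String), scanEq mk l = none → scanEq mg l = none → scanIn mk l = none →
      scanIn mg l = none → loopB mk mg l 4 b = (4, b) := by
  induction l with
  | nil => intro b _ _ _ _; rfl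
  | cons hd tl ih =>
    intro b h0 h1 h2 h3
    obtain ⟨k, path⟩ := hd
    by_cases hk : k == mk
    · simp only [scanEq, if_pos hk] at h0; cases h0
    by_cases hg : k == mg
    · simp only [scanEq, if_pos hg] at h1; cases h1
    by_cases hin : PySem.Str.isIn k mk
    · simp only [scanIn, if_pos hin] at h2; cases h2
    by_cases hig : PySem.Str.isIn k mg
    · simp only [scanIn, if_pos hig] at h3; cases h3
    simp only [scanEq, if_neg hk] at h0
    simp only [scanEq, if_neg hg] at h1
    simp only [scanIn, if_neg hin] at h2
    simp only [scanIn, if_neg hig] at h3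
    have hq : pvPrio mk mg k = 4 := by
      simp only [pvPrio, if_neg hk, if_neg hg, if_neg hin, if_neg hig]
    simp only [loopB, hq, if_neg (by omega : ¬ (4:Nat) < 4)]
    exact ih b h0 h1 h2 h3

-- ===== VERDICT (by name: the statement is the Claim_ definition above) =====
theorem find_icon_spec : Claim_equal_find_icon := by
  intro mk mg icons _ _
  unfold Spec_find_icon find_icon find_icon_alt
  generalize pvItems icons = items
  cases h0 : scanEq mk items with
  | some x => rw [loopB_find0 mk mg items x 4 none (by omega) h0]
  | none =>
    cases h1 : scanEq mg items with
    | some x => rw [loopB_find1 mk mg items x 4 none (by omega) h0 h1]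
    | none =>
      cases h2 : scanIn mk items with
      | some x => rw [loopB_find2 mk mg items x 4 none (by omega) h0 h1 h2]
      | none =>
        cases h3 : scanIn mg items with
        | some x => rw [loopB_find3 mk mg items x none h0 h1 h2 h3]
        | none => rw [loopB_none mk mg items none h0 h1 h2 h3]
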